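-- pv_equiv track=rewrite | github.com/GIftSibusiso/Beginner-exercises | team_allocator.py | nw_physical_teams
-- ===== SOURCE A (Python) =====
-- def space_maker(string):
--     output = ""
--     for i in string:
--         if i != " ":
--             output += i
--     return output
--
-- def nw_physical_teams(nw_physical_students):
--     '''
--     from the list of nw_physical_students, create list of 4 students per team, and add them to
--     one big list
--     '''
--     nw_physical_teams = []
--     team = []
--
--     for students in nw_physical_students:
--         if len(team) == 4:
--             nw_physical_teams.append(team)
--             team = []
--         team.append(space_maker(students).lower())
--
--     if len(team) > 0:
--         nw_physical_teams.append(team)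
--
--     return nw_physical_teams
-- ===== SOURCE B (Python) =====
-- def _normalize(name):
--     return "".join(c for c in name if c != " ").lower()
--
-- def nw_physical_teams(nw_physical_students):
--     if not nw_physical_students:
--         return []
--     head = [_normalize(s) for s in nw_physical_students[:4]]
--     return [head] + nw_physical_teams(nw_physical_students[4:])
-- ===== Notes on version B (the rewrite author's own statement) =====
-- stated objective: idiomatic
-- what changed: Replaces A's running team buffer with flush-before-append bookkeeping by direct structural recursion: normalize the first slice of 4 and recurse on the rest, with normalization as a join-of-filtered-characters comprehension instead of a character-accumulating loop.
import Mathlib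
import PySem

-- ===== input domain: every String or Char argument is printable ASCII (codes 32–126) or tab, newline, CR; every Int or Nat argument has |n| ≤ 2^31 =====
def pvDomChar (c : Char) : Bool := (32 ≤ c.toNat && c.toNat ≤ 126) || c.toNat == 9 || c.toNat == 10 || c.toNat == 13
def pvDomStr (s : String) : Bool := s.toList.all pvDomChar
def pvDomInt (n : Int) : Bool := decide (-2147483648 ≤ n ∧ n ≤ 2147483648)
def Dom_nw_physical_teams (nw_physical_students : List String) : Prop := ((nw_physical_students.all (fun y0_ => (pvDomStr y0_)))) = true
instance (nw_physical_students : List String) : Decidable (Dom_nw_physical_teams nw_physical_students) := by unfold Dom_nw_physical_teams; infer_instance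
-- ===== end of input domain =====

-- B replaces the running team buffer / flush bookkeeping by structural recursion on 4-element
-- slices and a filter-based normalization; same cost, more idiomatic.

-- ===== PORT A =====
-- space_maker: character loop accumulating the non-space characters (string built as List Char).
def space_maker (s : String) : String :=
  String.mk (s.toList.foldl (fun out c => if c ≠ ' ' then out ++ [c] else out) [])

-- one iteration of A's for-loop over students: flush a full team, then append the normalized name
def nwStep (st : List (List String) × List String) (s : String) :
    List (List String) × List String :=
  let st' := if st.2.length == 4 then (st.1 ++ [st.2], ([] : List String)) else st
  (st'.1, st'.2 ++ [PySem.Str.lower (space_maker s)])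

def nw_physical_teams (nw_physical_students : List String) : List (List String) :=
  let st := nw_physical_students.foldl nwStep ([], [])
  if st.2.length > 0 then st.1 ++ [st.2] else st.1

-- ===== PORT B =====
-- "".join(c for c in name if c != " ").lower()
def normalizeName (name : String) : String :=
  PySem.Str.lower (String.mk (name.toList.filter (fun c => c != ' ')))

def nw_physical_teams_alt (nw_physical_students : List String) : List (List String) :=
  if h : nw_physical_students = [] then []
  else
    (PySem.List.slice nw_physical_students none (some 4)).map normalizeName ::
      nw_physical_teams_alt (PySem.List.slice nw_physical_students (some 4) none)
termination_by nw_physical_students.length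
decreasing_by
  rw [PySem.List.slice_from _ (by norm_num)]
  cases nw_physical_students with
  | nil => exact absurd rfl h
  | cons a l => simp

-- ===== PRECONDITION & SPEC =====
def Spec_nw_physical_teams (nw_physical_students : List String) (out : List (List String)) : Prop := out = nw_physical_teams_alt nw_physical_students
instance (nw_physical_students : List String) (out : List (List String)) : Decidable (Spec_nw_physical_teams nw_physical_students out) := by unfold Spec_nw_physical_teams; infer_instance

-- ===== CLAIM (what is proved, stated in full; the proofs are below) =====
def Claim_equal_nw_physical_teams : Prop := ∀ (nw_physical_students : List String), Dom_nw_physical_teams nw_physical_students → Spec_nw_physical_teams nw_physical_students (nw_physical_teams nw_physical_students)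

-- ===== LEMMAS AND PROOFS =====

-- the two normalizations agree
theorem lowerSpaceMaker_eq (s : String) :
    PySem.Str.lower (space_maker s) = normalizeName s := by
  unfold space_maker normalizeName
  congr 2
  rw [PySem.List.foldl_append_ite_eq_filter]
  simp only [List.nil_append]
  apply List.filter_congr
  intro x _
  simp [bne, beq_eq_decide]

-- plain chunking into blocks of 4 (proof helper)
def chunk4 (l : List String) : List (List String) :=
  if h : l = [] then []
  else l.take 4 :: chunk4 (l.drop 4)
termination_by l.length
decreasing_by cases l with
  | nil => exact absurd rfl h
  | cons a t => simp

theorem alt_eq_chunk4 (l : List String) :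
    nw_physical_teams_alt l = chunk4 (l.map normalizeName) := by
  induction l using nw_physical_teams_alt.induct with
  | case1 => simp [nw_physical_teams_alt, chunk4]
  | case2 l h ih =>
    rw [nw_physical_teams_alt, dif_neg h]
    rw [PySem.List.slice_from _ (by norm_num)] at ih
    rw [PySem.List.slice_from _ (by norm_num), PySem.List.slice_to _ (by norm_num)]
    norm_num at ih ⊢
    rw [ih]
    conv_rhs => rw [chunk4]
    rw [dif_neg (by simpa using h)]
    simp

-- the final flush of A
def finish (st : List (List String) × List String) : List (List String) :=
  if st.2.length > 0 then st.1 ++ [st.2] else st.1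

theorem chunk4_cons_full (t r : List String) (ht : t.length = 4) :
    chunk4 (t ++ r) = t :: chunk4 r := by
  rw [chunk4, dif_neg (by
    intro hc
    rcases List.append_eq_nil_iff.mp hc with ⟨h1, _⟩
    simp [h1] at ht)]
  congr 1
  · rw [List.take_append_of_le_length (by omega)]
    exact (List.take_of_length_le (by omega))
  · congr 1
    rw [List.drop_append_of_le_length (by omega), List.drop_eq_nil_of_le ht.le]
    simp

theorem foldl_invariant (xs : List String) :
    ∀ (acc : List (List String)) (team : List String), team.length ≤ 4 →
    finish (xs.foldl nwStep (acc, team)) = acc ++ chunk4 (team ++ xs.map normalizeName) := by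
  induction xs with
  | nil =>
    intro acc team hlen
    simp only [List.foldl_nil, List.map_nil, List.append_nil, finish]
    by_cases hnil : team = []
    · simp [hnil, chunk4]
    · rw [if_pos (by cases team with | nil => exact absurd rfl hnil | cons a t => simp)]
      rw [chunk4, dif_neg hnil, List.take_of_length_le hlen,
          List.drop_eq_nil_of_le hlen]
      simp [chunk4]
  | cons s rest ih =>
    intro acc team hlen
    simp only [List.foldl_cons, List.map_cons]
    by_cases hfull : team.length = 4
    · have : nwStep (acc, team) s =
          (acc ++ [team], [PySem.Str.lower (space_maker s)]) := by
        simp [nwStep, hfull]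
      rw [this, ih (acc ++ [team]) [PySem.Str.lower (space_maker s)] (by simp)]
      rw [lowerSpaceMaker_eq]
      rw [show team ++ normalizeName s :: List.map normalizeName rest
            = team ++ ([normalizeName s] ++ List.map normalizeName rest) from by simp,
          chunk4_cons_full team _ hfull]
      simp
    · have : nwStep (acc, team) s =
          (acc, team ++ [PySem.Str.lower (space_maker s)]) := by
        simp [nwStep, hfull]
      rw [this, ih acc _ (by simp; omega)]
      rw [lowerSpaceMaker_eq]
      simp

-- ===== VERDICT (by name: the statement is the Claim_ definition above) =====
theorem nw_physical_teams_spec : Claim_equal_nw_physical_teams := by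
  intro xs _
  unfold Spec_nw_physical_teams
  have h := foldl_invariant xs [] [] (by simp)
  unfold nw_physical_teams
  calc (let st := xs.foldl nwStep ([], []);
        if st.2.length > 0 then st.1 ++ [st.2] else st.1)
      = finish (xs.foldl nwStep ([], [])) := rfl
    _ = [] ++ chunk4 ([] ++ xs.map normalizeName) := h
    _ = nw_physical_teams_alt xs := by simp [alt_eq_chunk4]
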